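-- pv_equiv track=rewrite | github.com/pypi-data/pypi-mirror-373 | packages/qlat-utils/qlat_utils-0.81.tar.gz/qlat_utils-0.81/qlat_utils/scripts/qar.py | remove_trailing_slashes
-- ===== SOURCE A (Python) =====
-- def remove_trailing_slashes(path):
--     while True:
--         if path == "":
--             return ""
--         if path[-1] == "/":
--             path = path[:-1]
--         else:
--             break
--     return path
-- ===== SOURCE B (Python) =====
-- def remove_trailing_slashes(path):
--     i = len(path)
--     while i > 0 and path[i - 1] == '/':
--         i -= 1
--     return path[:i]
-- ===== Notes on version B (the rewrite author's own statement) =====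
-- stated objective: alternative
-- what changed: Replaced the repeated one-character slicing loop by a backward index scan that finds the boundary of the trailing-slash run and takes a single final slice.
import Mathlib
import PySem

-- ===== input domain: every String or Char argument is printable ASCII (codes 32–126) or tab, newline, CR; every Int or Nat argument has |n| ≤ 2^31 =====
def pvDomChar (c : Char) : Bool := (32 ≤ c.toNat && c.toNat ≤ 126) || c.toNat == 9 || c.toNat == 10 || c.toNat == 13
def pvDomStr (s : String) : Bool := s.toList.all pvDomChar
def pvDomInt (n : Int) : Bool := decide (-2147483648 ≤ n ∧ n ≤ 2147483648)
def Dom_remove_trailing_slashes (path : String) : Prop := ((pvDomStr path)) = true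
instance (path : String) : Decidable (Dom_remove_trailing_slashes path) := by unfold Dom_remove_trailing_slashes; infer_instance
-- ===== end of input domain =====

-- B replaces A's repeated one-character slicing loop by a backward boundary scan and one final slice.

-- ===== PORT A =====
-- A's while loop: if path == "" return ""; if last char is '/', drop it (path[:-1]) and loop; else return path.
-- Hand port over List Char: getLast? = path[-1] (none only when empty, matching the explicit empty check),
-- dropLast = path[:-1]; exact on all inputs.
def pvGoA (l : List Char) : List Char :=
  if l = [] then []
  else if l.getLast? = some '/' then pvGoA l.dropLast
  else l
termination_by l.length
decreasing_by
  have : l.length ≠ 0 := by simpa using ‹l ≠ []›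
  simp [List.length_dropLast]; omega

def remove_trailing_slashes (path : String) : String :=
  String.mk (pvGoA path.toList)

-- ===== PORT B =====
-- B's while loop: i starts at len(path); while i > 0 and path[i-1] == '/', decrement i. Structural recursion on i.
def pvFindB (l : List Char) : Nat → Nat
  | 0 => 0
  | (i+1) => if l.getD i ' ' = '/' then pvFindB l i else i + 1

def remove_trailing_slashes_alt (path : String) : String :=
  String.mk (path.toList.take (pvFindB path.toList path.toList.length))

-- ===== PRECONDITION & SPEC =====
def Spec_remove_trailing_slashes (path : String) (out : String) : Prop := out = remove_trailing_slashes_alt path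
instance (path : String) (out : String) : Decidable (Spec_remove_trailing_slashes path out) := by unfold Spec_remove_trailing_slashes; infer_instance

-- ===== CLAIM (what is proved, stated in full; the proofs are below) =====
def Claim_equal_remove_trailing_slashes : Prop := ∀ (path : String), Dom_remove_trailing_slashes path → Spec_remove_trailing_slashes path (remove_trailing_slashes path)

-- ===== LEMMAS AND PROOFS =====
theorem pvFindB_le (l : List Char) (i : Nat) : pvFindB l i ≤ i := by
  induction i with
  | zero => simp [pvFindB]
  | succ i ih => simp only [pvFindB]; split <;> omega

theorem pvFindB_append (xs : List Char) (c : Char) (i : Nat) (h : i ≤ xs.length) :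
    pvFindB (xs ++ [c]) i = pvFindB xs i := by
  induction i with
  | zero => rfl
  | succ i ih =>
    simp only [pvFindB]
    have hi : i < xs.length := h
    rw [List.getD, List.getD, List.getElem?_append_left hi, ih (Nat.le_of_lt hi)]

theorem pvGoA_eq (l : List Char) : pvGoA l = l.take (pvFindB l l.length) := by
  induction l using List.reverseRecOn with
  | nil => simp [pvGoA, pvFindB]
  | append_singleton xs c ih =>
    rw [pvGoA]
    simp only [List.append_eq_nil_iff, List.cons_ne_self, and_false, if_false,
      List.getLast?_concat, List.dropLast_concat, List.length_append, List.length_singleton]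
    have hget : (xs ++ [c]).getD xs.length ' ' = c := by
      simp [List.getD, List.getElem?_append_right (Nat.le_refl _)]
    by_cases hc : c = '/'
    · rw [if_pos (by rw [hc]), ih]
      have : pvFindB (xs ++ [c]) (xs.length + 1) = pvFindB xs xs.length := by
        simp only [pvFindB, hget, if_pos hc]
        exact pvFindB_append xs c xs.length (Nat.le_refl _)
      rw [this, List.take_append_of_le_length (pvFindB_le xs xs.length)]
    · rw [if_neg (by simpa using hc)]
      have : pvFindB (xs ++ [c]) (xs.length + 1) = xs.length + 1 := by
        simp only [pvFindB, hget, if_neg hc]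
      rw [this]
      have hlen : xs.length + 1 = (xs ++ [c]).length := by simp
      rw [hlen, List.take_length]

-- ===== VERDICT (by name: the statement is the Claim_ definition above) =====
theorem remove_trailing_slashes_spec : Claim_equal_remove_trailing_slashes := by
  intro path _
  unfold Spec_remove_trailing_slashes remove_trailing_slashes remove_trailing_slashes_alt
  rw [pvGoA_eq]
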